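-- pv_equiv track=rewrite | github.com/dan-stowell/dansaoc | aoc2023.py | find_possible_gameids
-- ===== SOURCE A (Python) =====
-- def find_possible_gameids(gameid2cubesets, bag_contents):
--   all_gameids = set(gameid2cubesets.keys())
--   impossible_gameids = set()
--   for gameid, cubesets in gameid2cubesets.items():
--     for cubeset in cubesets:
--       for color, count in cubeset.items():
--         if color not in bag_contents or count > bag_contents[color]:
--           impossible_gameids.add(gameid)
--   possible_gameids = all_gameids.difference(impossible_gameids)
--   return possible_gameids
-- ===== SOURCE B (Python) =====
-- def max_demand(cubesets):
--   need = {}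
--   for cubeset in cubesets:
--     for color, count in cubeset.items():
--       if color not in need or count > need[color]:
--         need[color] = count
--   return need
--
--
-- def fits(need, bag_contents):
--   for color, count in need.items():
--     if color not in bag_contents or count > bag_contents[color]:
--       return False
--   return True
--
--
-- def find_possible_gameids(gameid2cubesets, bag_contents):
--   return {gameid for gameid, cubesets in gameid2cubesets.items()
--           if fits(max_demand(cubesets), bag_contents)}
-- ===== Notes on version B (the rewrite author's own statement) =====
-- stated objective: alternative
-- what changed: Instead of scanning every (color,count) entry against the bag and accumulating impossible ids to subtract, B first aggregates each game's cubesets into a maximal-demand dict (max count per color) and then decides the game with one per-color comparison of that summary against the bag.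
import Mathlib
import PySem

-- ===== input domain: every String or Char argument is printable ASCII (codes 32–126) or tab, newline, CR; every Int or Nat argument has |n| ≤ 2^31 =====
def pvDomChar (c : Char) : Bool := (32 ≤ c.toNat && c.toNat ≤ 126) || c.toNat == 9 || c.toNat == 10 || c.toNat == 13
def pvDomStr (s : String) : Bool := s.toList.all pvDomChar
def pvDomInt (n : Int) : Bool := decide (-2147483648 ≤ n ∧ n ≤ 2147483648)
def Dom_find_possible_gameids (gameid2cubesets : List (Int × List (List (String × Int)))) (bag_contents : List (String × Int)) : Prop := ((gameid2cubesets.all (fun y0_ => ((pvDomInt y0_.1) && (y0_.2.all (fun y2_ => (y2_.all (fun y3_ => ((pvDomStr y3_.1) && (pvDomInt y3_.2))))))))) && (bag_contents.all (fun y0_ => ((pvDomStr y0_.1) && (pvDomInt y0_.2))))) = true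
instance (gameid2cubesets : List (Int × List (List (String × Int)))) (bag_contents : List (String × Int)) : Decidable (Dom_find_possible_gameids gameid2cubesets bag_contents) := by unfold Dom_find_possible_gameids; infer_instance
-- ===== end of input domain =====

-- B replaces A's entry-by-entry impossible-set accumulation and set difference by a two-stage
-- per-game computation: aggregate each game's cubesets into a maximal-demand dict, then compare
-- that summary against the bag (objective: alternative; return value only — neither mutates its arguments).


-- ===== PORT A =====
-- literal transliteration of A; `bag.getD cc.1 0` is only reached when `bag.contains cc.1` holds
-- (short-circuit `or`), exactly where Python evaluates `bag_contents[color]`.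
def find_possible_gameids (gameid2cubesets : List (Int × List (List (String × Int)))) (bag_contents : List (String × Int)) : List Int :=
  let d := PySem.Dict.ofList gameid2cubesets
  let bag := PySem.Dict.ofList bag_contents
  let all_gameids : PySem.Set Int := PySem.Set.ofList d.keys
  let impossible_gameids : PySem.Set Int :=
    d.items.foldl (fun imp gc =>
      gc.2.foldl (fun imp cubeset =>
        (PySem.Dict.ofList cubeset).items.foldl (fun imp cc =>
          if !(bag.contains cc.1) || decide (bag.getD cc.1 0 < cc.2)
          then PySem.Set.add imp gc.1 else imp) imp) imp) PySem.Set.empty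
  PySem.Set.diff all_gameids impossible_gameids

-- ===== PORT B =====
-- transliteration of Source B's max_demand: build the per-game maximal-demand dict
-- (`need[color] = count` when color is new or count exceeds the stored maximum).
def fpg_max_demand (cubesets : List (List (String × Int))) : PySem.Dict String Int :=
  cubesets.foldl (fun need cubeset =>
    (PySem.Dict.ofList cubeset).items.foldl (fun need cc =>
      if !(need.contains cc.1) || decide (need.getD cc.1 0 < cc.2)
      then need.insert cc.1 cc.2 else need) need) PySem.Dict.empty

-- transliteration of Source B's fits: early-return loop over need.items()
def fpg_fits (need : List (String × Int)) (bag : PySem.Dict String Int) : Bool :=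
  match need with
  | [] => true
  | cc :: rest =>
    if !(bag.contains cc.1) || decide (bag.getD cc.1 0 < cc.2) then false
    else fpg_fits rest bag

-- transliteration of Source B's set comprehension over the games
def find_possible_gameids_alt (gameid2cubesets : List (Int × List (List (String × Int)))) (bag_contents : List (String × Int)) : List Int :=
  let bag := PySem.Dict.ofList bag_contents
  (PySem.Dict.ofList gameid2cubesets).items.foldl (fun acc gc =>
    if fpg_fits (fpg_max_demand gc.2).items bag
    then PySem.Set.add acc gc.1 else acc) PySem.Set.empty

-- ===== PRECONDITION & SPEC =====
def Spec_find_possible_gameids (gameid2cubesets : List (Int × List (List (String × Int)))) (bag_contents : List (String × Int)) (out : List Int) : Prop := out = find_possible_gameids_alt gameid2cubesets bag_contents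
instance (gameid2cubesets : List (Int × List (List (String × Int)))) (bag_contents : List (String × Int)) (out : List Int) : Decidable (Spec_find_possible_gameids gameid2cubesets bag_contents out) := by unfold Spec_find_possible_gameids; infer_instance

-- ===== CLAIM (what is proved, stated in full; the proofs are below) =====
def Claim_equal_find_possible_gameids : Prop := ∀ (gameid2cubesets : List (Int × List (List (String × Int)))) (bag_contents : List (String × Int)), Dom_find_possible_gameids gameid2cubesets bag_contents → Spec_find_possible_gameids gameid2cubesets bag_contents (find_possible_gameids gameid2cubesets bag_contents)

-- ===== LEMMAS AND PROOFS =====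

-- A's per-entry "cubes don't fit" test and its per-game lift, as named predicates.
def fpgBad (bag : PySem.Dict String Int) (cc : String × Int) : Bool :=
  !(bag.contains cc.1) || decide (bag.getD cc.1 0 < cc.2)

def fpgBadGame (bag : PySem.Dict String Int) (cubesets : List (List (String × Int))) : Bool :=
  cubesets.any (fun cubeset => (PySem.Dict.ofList cubeset).items.any (fpgBad bag))

-- the update B's max_demand loop performs for one entry
def fpgStep (need : PySem.Dict String Int) (cc : String × Int) : PySem.Dict String Int :=
  if !(need.contains cc.1) || decide (need.getD cc.1 0 < cc.2)
  then need.insert cc.1 cc.2 else need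

-- optional max on Option Int, the value fpgStep stores at the touched key
def fpgOmax (o : Option Int) (n : Int) : Int :=
  match o with
  | none => n
  | some u => if u < n then n else u

lemma fpgOmax_right (o : Option Int) (n : Int) : n ≤ fpgOmax o n := by
  cases o with
  | none => simp [fpgOmax]
  | some u => simp only [fpgOmax]; split_ifs <;> omega

lemma fpgOmax_left (u n : Int) : u ≤ fpgOmax (some u) n := by
  simp only [fpgOmax]; split_ifs <;> omega

lemma fpgOmax_attain (o : Option Int) (n : Int) :
    fpgOmax o n = n ∨ ∃ u, o = some u ∧ fpgOmax o n = u := by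
  cases o with
  | none => exact Or.inl rfl
  | some u =>
    simp only [fpgOmax]
    split_ifs with h
    · exact Or.inl rfl
    · exact Or.inr ⟨u, rfl, rfl⟩

-- one fpgStep, seen through get?
lemma fpgStep_get? (need : PySem.Dict String Int) (cc : String × Int) (c : String) :
    (fpgStep need cc).get? c
      = if cc.1 = c then some (fpgOmax (need.get? c) cc.2) else need.get? c := by
  unfold fpgStep
  by_cases hc : cc.1 = c
  · subst hc
    rw [PySem.Dict.contains_eq_isSome_get?]
    cases hg : need.get? cc.1 with
    | none =>
      simp [PySem.Dict.get?_insert_self, fpgOmax]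
    | some v =>
      have hgd : need.getD cc.1 0 = v := PySem.Dict.getD_of_get?_eq_some need 0 hg
      simp only [Option.isSome_some, Bool.not_true, Bool.false_or, hgd, fpgOmax]
      by_cases hv : v < cc.2
      · simp [hv, PySem.Dict.get?_insert_self]
      · simp [hv, hg]
  · have hc' : c ≠ cc.1 := fun he => hc he.symm
    rw [if_neg hc]
    split_ifs with h
    · simp [PySem.Dict.get?_insert, hc']
    · rfl

-- the whole max_demand fold, seen through get?: it computes a running optional max at each key
lemma fpg_spec_get (c : String) (E : List (String × Int)) (need : PySem.Dict String Int) :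
    (E.foldl fpgStep need).get? c
      = E.foldl (fun o cc => if cc.1 = c then some (fpgOmax o cc.2) else o) (need.get? c) := by
  induction E generalizing need with
  | nil => rfl
  | cons hd tl ih =>
    rw [List.foldl_cons, List.foldl_cons, ih, fpgStep_get?]

lemma fpg_gfold_none (c : String) (E : List (String × Int)) (o : Option Int) :
    E.foldl (fun o cc => if cc.1 = c then some (fpgOmax o cc.2) else o) o = none
      ↔ o = none ∧ ∀ cc ∈ E, cc.1 ≠ c := by
  induction E generalizing o with
  | nil => simp
  | cons hd tl ih =>
    rw [List.foldl_cons]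
    by_cases hc : hd.1 = c
    · rw [if_pos hc, ih]
      constructor
      · rintro ⟨h1, -⟩
        exact absurd h1 (by simp)
      · rintro ⟨-, h2⟩
        exact absurd hc (h2 hd List.mem_cons_self)
    · rw [if_neg hc, ih]
      constructor
      · rintro ⟨h1, h2⟩
        refine ⟨h1, fun cc hcc => ?_⟩
        rcases List.mem_cons.mp hcc with rfl | hcc'
        · exact hc
        · exact h2 cc hcc'
      · rintro ⟨h1, h2⟩
        exact ⟨h1, fun cc hcc => h2 cc (List.mem_cons_of_mem _ hcc)⟩

lemma fpg_gfold_some (c : String) (E : List (String × Int)) (o : Option Int) (v : Int)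
    (h : E.foldl (fun o cc => if cc.1 = c then some (fpgOmax o cc.2) else o) o = some v) :
    (o = some v ∨ ∃ cc ∈ E, cc.1 = c ∧ cc.2 = v)
      ∧ (∀ u, o = some u → u ≤ v) ∧ (∀ cc ∈ E, cc.1 = c → cc.2 ≤ v) := by
  induction E generalizing o with
  | nil =>
    refine ⟨Or.inl h, fun u hu => by rw [hu] at h; injection h with h; omega, by simp⟩
  | cons hd tl ih =>
    rw [List.foldl_cons] at h
    by_cases hc : hd.1 = c
    · rw [if_pos hc] at h
      obtain ⟨h1, h2, h3⟩ := ih (some (fpgOmax o hd.2)) h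
      have homax : fpgOmax o hd.2 ≤ v := h2 _ rfl
      refine ⟨?_, ?_, ?_⟩
      · rcases h1 with h1 | ⟨cc, hcc, hk, hv⟩
        · injection h1 with h1
          rcases fpgOmax_attain o hd.2 with ha | ⟨u, hu, ha⟩
          · exact Or.inr ⟨hd, List.mem_cons_self, hc, by omega⟩
          · have huv : u = v := by rw [← ha, h1]
            exact Or.inl (by rw [hu, huv])
        · exact Or.inr ⟨cc, List.mem_cons_of_mem _ hcc, hk, hv⟩
      · intro u hu
        rw [hu] at homax
        calc u ≤ fpgOmax (some u) hd.2 := fpgOmax_left u hd.2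
          _ ≤ v := homax
      · intro cc hcc hk
        rcases List.mem_cons.mp hcc with rfl | hcc'
        · calc cc.2 ≤ fpgOmax o cc.2 := fpgOmax_right o cc.2
            _ ≤ v := homax
        · exact h3 cc hcc' hk
    · rw [if_neg hc] at h
      obtain ⟨h1, h2, h3⟩ := ih o h
      refine ⟨?_, h2, ?_⟩
      · rcases h1 with h1 | ⟨cc, hcc, hk, hv⟩
        · exact Or.inl h1
        · exact Or.inr ⟨cc, List.mem_cons_of_mem _ hcc, hk, hv⟩
      · intro cc hcc hk
        rcases List.mem_cons.mp hcc with rfl | hcc'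
        · exact absurd hk hc
        · exact h3 cc hcc' hk

-- the max_demand fold keeps keys unique
lemma fpg_nodup_keys (E : List (String × Int)) (d : PySem.Dict String Int)
    (h : d.keys.Nodup) : (E.foldl fpgStep d).keys.Nodup := by
  induction E generalizing d with
  | nil => exact h
  | cons hd tl ih =>
    rw [List.foldl_cons]
    apply ih
    unfold fpgStep
    split_ifs
    · exact PySem.Dict.nodup_keys_insert _ _ _ h
    · exact h

-- the max-demand dict has a bad entry iff some original cube entry is bad
lemma fpg_demand_bad_iff (bag : PySem.Dict String Int) (cubesets : List (List (String × Int))) :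
    (fpg_max_demand cubesets).items.any (fpgBad bag) = fpgBadGame bag cubesets := by
  have hD : fpg_max_demand cubesets
      = (cubesets.flatMap (fun cubeset => (PySem.Dict.ofList cubeset).items)).foldl
          fpgStep PySem.Dict.empty := by
    unfold fpg_max_demand
    rw [List.foldl_flatMap]
    rfl
  have hG : fpgBadGame bag cubesets
      = (cubesets.flatMap (fun cubeset => (PySem.Dict.ofList cubeset).items)).any (fpgBad bag) := by
    unfold fpgBadGame
    rw [List.any_flatMap]
  set E := cubesets.flatMap (fun cubeset => (PySem.Dict.ofList cubeset).items) with hE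
  rw [hD, hG]
  set D := E.foldl fpgStep PySem.Dict.empty with hDdef
  have hnd : D.keys.Nodup := fpg_nodup_keys E PySem.Dict.empty (by simp [PySem.Dict.empty, PySem.Dict.keys])
  rw [Bool.eq_iff_iff, List.any_eq_true, List.any_eq_true]
  constructor
  · rintro ⟨⟨c, v⟩, hmem, hbad⟩
    have hget : D.get? c = some v := PySem.Dict.get?_of_mem_items _ hmem hnd
    rw [hDdef, fpg_spec_get] at hget
    obtain ⟨h1, -, -⟩ := fpg_gfold_some c E _ v hget
    rcases h1 with h1 | ⟨cc, hcc, hk, hv⟩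
    · simp [PySem.Dict.empty, PySem.Dict.get?] at h1
    · refine ⟨cc, hcc, ?_⟩
      have : cc = (c, v) := Prod.ext hk hv
      rw [this]
      exact hbad
  · rintro ⟨cc, hcc, hbad⟩
    cases hget : D.get? cc.1 with
    | none =>
      rw [hDdef, fpg_spec_get, fpg_gfold_none] at hget
      exact absurd rfl (hget.2 cc hcc)
    | some v =>
      have hle : cc.2 ≤ v := by
        have hget' := hget
        rw [hDdef, fpg_spec_get] at hget'
        exact (fpg_gfold_some cc.1 E _ v hget').2.2 cc hcc rfl
      refine ⟨(cc.1, v), PySem.Dict.mem_items_of_get?_eq_some _ hget, ?_⟩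
      unfold fpgBad at hbad ⊢
      simp only [Bool.or_eq_true, Bool.not_eq_true', decide_eq_true_eq] at hbad ⊢
      rcases hbad with hbad | hbad
      · exact Or.inl hbad
      · exact Or.inr (by omega)

-- B's fits is the negated any over its list
lemma fpg_fits_eq (l : List (String × Int)) (bag : PySem.Dict String Int) :
    fpg_fits l bag = !(l.any (fpgBad bag)) := by
  induction l with
  | nil => rfl
  | cons hd tl ih =>
    unfold fpg_fits
    by_cases h : fpgBad bag hd
    · rw [if_pos (by unfold fpgBad at h; exact h)]
      simp [h]
    · rw [if_neg (by unfold fpgBad at h; simpa using h), ih]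
      simp [h]

-- the per-game test B performs is the boolean negation of A's "game is impossible" test
lemma fpg_good_game (bag : PySem.Dict String Int) (cubesets : List (List (String × Int))) :
    fpg_fits (fpg_max_demand cubesets).items bag = !(fpgBadGame bag cubesets) := by
  rw [fpg_fits_eq, fpg_demand_bad_iff]

-- adding the same element twice is adding it once
lemma fpg_add_add (s : PySem.Set Int) (x : Int) :
    PySem.Set.add (PySem.Set.add s x) x = PySem.Set.add s x := by
  apply PySem.Set.add_of_mem
  simp [PySem.Set.mem_add]

-- innermost loop of A: it adds gid iff some entry of the cubeset is bad
lemma fpg_inner_fold (bag : PySem.Dict String Int) (gid : Int)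
    (l : List (String × Int)) (imp : PySem.Set Int) :
    l.foldl (fun imp cc => if fpgBad bag cc then PySem.Set.add imp gid else imp) imp
      = if l.any (fpgBad bag) then PySem.Set.add imp gid else imp := by
  induction l generalizing imp with
  | nil => simp
  | cons hd tl ih =>
    rw [List.foldl_cons]
    by_cases h : fpgBad bag hd
    · rw [if_pos h, ih, if_pos (by simp [h] : (hd :: tl).any (fpgBad bag) = true)]
      split_ifs
      · exact fpg_add_add imp gid
      · rfl
    · rw [if_neg h, ih,
        (by simp [h] : (hd :: tl).any (fpgBad bag) = tl.any (fpgBad bag))]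

-- middle loop of A: it adds gid iff the game is bad
lemma fpg_mid_fold (bag : PySem.Dict String Int) (gid : Int)
    (cubesets : List (List (String × Int))) (imp : PySem.Set Int) :
    cubesets.foldl (fun imp cubeset =>
        (PySem.Dict.ofList cubeset).items.foldl
          (fun imp cc => if fpgBad bag cc then PySem.Set.add imp gid else imp) imp) imp
      = if fpgBadGame bag cubesets then PySem.Set.add imp gid else imp := by
  induction cubesets generalizing imp with
  | nil => simp [fpgBadGame]
  | cons hd tl ih =>
    rw [List.foldl_cons, fpg_inner_fold]
    by_cases h : (PySem.Dict.ofList hd).items.any (fpgBad bag)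
    · rw [if_pos h, ih,
        if_pos (by simp [fpgBadGame, h] : fpgBadGame bag (hd :: tl) = true)]
      split_ifs
      · exact fpg_add_add imp gid
      · rfl
    · rw [if_neg h, ih,
        (by simp [fpgBadGame, h] : fpgBadGame bag (hd :: tl) = fpgBadGame bag tl)]

-- membership in the accumulated impossible set
lemma fpg_imp_mem (bag : PySem.Dict String Int)
    (l : List (Int × List (List (String × Int)))) (imp : PySem.Set Int) (g : Int) :
    (g ∈ l.foldl (fun imp gc => if fpgBadGame bag gc.2 then PySem.Set.add imp gc.1 else imp) imp)
      ↔ g ∈ imp ∨ ∃ gc ∈ l, gc.1 = g ∧ fpgBadGame bag gc.2 = true := by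
  induction l generalizing imp with
  | nil => simp
  | cons hd tl ih =>
    by_cases h : fpgBadGame bag hd.2
    · simp only [List.foldl_cons, h, if_pos, ih, PySem.Set.mem_add, List.mem_cons]
      constructor
      · rintro ((h1 | rfl) | h3)
        · exact Or.inl h1
        · exact Or.inr ⟨hd, Or.inl rfl, rfl, h⟩
        · obtain ⟨gc, hgc, he, hb⟩ := h3
          exact Or.inr ⟨gc, Or.inr hgc, he, hb⟩
      · rintro (h1 | ⟨gc, (rfl | hgc), he, hb⟩)
        · exact Or.inl (Or.inl h1)
        · exact Or.inl (Or.inr he.symm)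
        · exact Or.inr ⟨gc, hgc, he, hb⟩
    · simp only [List.foldl_cons, h, Bool.false_eq_true, if_false, ih, List.mem_cons]
      constructor
      · rintro (h1 | ⟨gc, hgc, he, hb⟩)
        · exact Or.inl h1
        · exact Or.inr ⟨gc, Or.inr hgc, he, hb⟩
      · rintro (h1 | ⟨gc, (rfl | hgc), he, hb⟩)
        · exact Or.inl h1
        · exact absurd hb (by simp [h])
        · exact Or.inr ⟨gc, hgc, he, hb⟩

-- B's fold: with pairwise-distinct game ids it appends exactly the passing ids, in order
lemma fpg_alt_fold (c : List (List (String × Int)) → Bool)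
    (l : List (Int × List (List (String × Int)))) (acc : PySem.Set Int)
    (hnd : (l.map (·.1)).Nodup) (hdisj : ∀ p ∈ l, p.1 ∉ acc) :
    l.foldl (fun acc gc => if c gc.2 then PySem.Set.add acc gc.1 else acc) acc
      = acc ++ (l.filter (fun gc => c gc.2)).map (·.1) := by
  induction l generalizing acc with
  | nil => simp
  | cons hd tl ih =>
    simp only [List.map_cons, List.nodup_cons] at hnd
    by_cases h : c hd.2
    · have hadd : PySem.Set.add acc hd.1 = acc ++ [hd.1] :=
        PySem.Set.add_of_not_mem (hdisj hd (by simp))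
      rw [List.foldl_cons, if_pos h, hadd,
        ih (acc ++ [hd.1]) hnd.2 ?_]
      · simp [h]
      · intro p hp
        simp only [List.mem_append, List.mem_singleton]
        rintro (hin | heq)
        · exact hdisj p (by simp [hp]) hin
        · exact hnd.1 (heq ▸ List.mem_map_of_mem hp)
    · rw [List.foldl_cons, if_neg (by simp [h]),
        ih acc hnd.2 (fun p hp => hdisj p (by simp [hp]))]
      simp [h]

-- ===== VERDICT (by name: the statement is the Claim_ definition above) =====
theorem find_possible_gameids_spec : Claim_equal_find_possible_gameids := by
  intro g2c bag_contents _
  unfold Spec_find_possible_gameids find_possible_gameids find_possible_gameids_alt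
  dsimp only
  set d := PySem.Dict.ofList g2c with hd
  set bag := PySem.Dict.ofList bag_contents with hbag
  have hnd : (d.items.map (·.1)).Nodup := PySem.Dict.nodup_keys_ofList g2c
  -- A's nested loops build exactly the single-condition fold
  have hmid : ∀ (imp : PySem.Set Int), ∀ gc ∈ d.items,
      gc.2.foldl (fun imp cubeset =>
        (PySem.Dict.ofList cubeset).items.foldl (fun imp cc =>
          if !(bag.contains cc.1) || decide (bag.getD cc.1 0 < cc.2)
          then PySem.Set.add imp gc.1 else imp) imp) imp
      = if fpgBadGame bag gc.2 then PySem.Set.add imp gc.1 else imp := by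
    intro imp gc _
    exact fpg_mid_fold bag gc.1 gc.2 imp
  rw [List.foldl_ext _ _ _ hmid]
  -- B's per-game test keeps exactly the not-bad ids
  have hgood : ∀ (acc : PySem.Set Int), ∀ gc ∈ d.items,
      (if fpg_fits (fpg_max_demand gc.2).items bag
       then PySem.Set.add acc gc.1 else acc)
      = if !(fpgBadGame bag gc.2) then PySem.Set.add acc gc.1 else acc := by
    intro acc gc _
    rw [fpg_good_game]
  rw [List.foldl_ext _ _ _ hgood,
    fpg_alt_fold (fun cs => !(fpgBadGame bag cs)) d.items PySem.Set.empty hnd (by simp [PySem.Set.empty])]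
  -- the left side: keys (nodup) filtered by non-membership in the impossible set
  have hkeys : d.keys = d.items.map (·.1) := rfl
  have hndk : d.keys.Nodup := by rw [hkeys]; exact hnd
  have hset : PySem.Set.ofList d.keys = d.items.map (·.1) := by
    rw [PySem.Set.ofList_eq_self_of_nodup _ hndk, hkeys]
  rw [hset]
  show (d.items.map (·.1)).filter
      (fun x => !(PySem.Set.contains
        (d.items.foldl (fun imp gc => if fpgBadGame bag gc.2 then PySem.Set.add imp gc.1 else imp)
          PySem.Set.empty) x)) = _
  rw [List.filter_map]
  simp only [PySem.Set.empty, List.nil_append]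
  congr 1
  apply List.filter_congr
  intro gc hgc
  simp only [Function.comp]
  congr 1
  apply Bool.coe_iff_coe.mp
  rw [PySem.Set.contains_iff, fpg_imp_mem]
  simp only [List.not_mem_nil, false_or]
  constructor
  · rintro ⟨gc', hgc', he, hb⟩
    have : gc' = gc := List.inj_on_of_nodup_map hnd hgc' hgc he
    exact this ▸ hb
  · intro hb
    exact ⟨gc, hgc, rfl, hb⟩
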